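-- pv_equiv track=rewrite | github.com/Alexandrova1Tatiana/public-235 | q.py | helper
-- ===== SOURCE A (Python) =====
-- word="banana"
--
-- def helper(s, arr, remain, length):
--     if length==0:
--         arr.append(remain+len(s)*"-")
--         return
--     for i,j in enumerate(s):
--         if j==word[len(word)-length]:
--             helper(s[i+1:], arr, remain+"-"*i+j, length-1)
--     return arr
-- ===== SOURCE B (Python) =====
-- word = "banana"
--
-- def helper(s, arr, remain, length):
--     # Iterative breadth-first worklist instead of A's recursive DFS.
--     # NOTE: like A, this appends the results to arr in place.
--     if length == 0:
--         arr.append(remain + len(s) * "-")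
--         return
--     states = [(remain, s)]
--     for t in range(length):
--         c = word[len(word) - length + t]
--         new_states = []
--         for prefix, rest in states:
--             for i, ch in enumerate(rest):
--                 if c == ch:
--                     new_states.append((prefix + "-" * i + ch, rest[i + 1:]))
--         states = new_states
--     for prefix, rest in states:
--         arr.append(prefix + "-" * len(rest))
--     return arr
-- ===== Notes on version B (the rewrite author's own statement) =====
-- stated objective: alternative
-- what changed: Replaces A's recursive DFS (one recursive call per matched character, threading the output list) by an iterative breadth-first worklist that expands one target character of 'banana' per layer over (prefix, rest-of-string) states and emits all placements after the last layer.
-- outside the precondition, e.g. on helper('', [], 'x', 13): A returns [], B raises IndexError; on helper('', [], 'x', -1): A returns [], B returns ['x']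
import Mathlib
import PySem

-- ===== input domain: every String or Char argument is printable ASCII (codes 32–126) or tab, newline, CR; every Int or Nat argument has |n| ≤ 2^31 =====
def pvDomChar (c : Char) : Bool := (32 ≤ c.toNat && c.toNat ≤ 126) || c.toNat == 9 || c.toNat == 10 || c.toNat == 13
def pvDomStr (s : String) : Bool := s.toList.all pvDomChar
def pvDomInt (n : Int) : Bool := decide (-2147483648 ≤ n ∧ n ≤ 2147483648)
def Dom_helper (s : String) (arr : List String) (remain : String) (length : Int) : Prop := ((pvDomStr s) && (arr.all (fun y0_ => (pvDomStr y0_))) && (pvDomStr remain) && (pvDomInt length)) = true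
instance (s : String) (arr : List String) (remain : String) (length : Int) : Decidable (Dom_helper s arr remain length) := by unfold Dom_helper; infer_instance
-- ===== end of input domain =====

-- B replaces A's recursive DFS by an iterative layer-per-character worklist (alternative
-- decomposition, same cost). Both A and B append the results to arr in place; the equivalence
-- proved here is about the RETURN value (which is arr after those appends).

-- module constant shared by both versions (Python module global `word`)
def word : String := "banana"

def dashes (n : Nat) : String := String.mk (List.replicate n '-')

-- ===== PORT A =====
mutual
-- A's recursion, on the character list of s; loopA is `for i,j in enumerate(s): …`,
-- threading the mutated arr through the recursive calls exactly as Python does.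
def helperACore (s : List Char) (arr : List String) (remain : String) (length : Int) : List String :=
  if length = 0 then arr ++ [remain ++ dashes s.length]
  else loopA arr remain length 0 s
  termination_by 2 * s.length + 1

def loopA (arr : List String) (remain : String) (length : Int) (i : Nat) (rest : List Char) : List String :=
  match rest with
  | [] => arr
  | j :: rest' =>
    let arr' := if PySem.Str.pyGet? word (PySem.Str.len word - length) = some j
      then helperACore rest' arr (remain ++ dashes i ++ String.mk [j]) (length - 1)
      else arr
    loopA arr' remain length (i + 1) rest'
  termination_by 2 * rest.length
end

def helper (s : String) (arr : List String) (remain : String) (length : Int) : List String :=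
  helperACore s.toList arr remain length

-- ===== PORT B =====
-- inner scan `for i, ch in enumerate(rest): …` of one state, appending to the accumulator
def scanB (c : Option Char) (p : String) (i : Nat) (rest : List Char) (acc : List (String × List Char)) : List (String × List Char) :=
  match rest with
  | [] => acc
  | ch :: rest' =>
      scanB c p (i + 1) rest'
        (if c = some ch then acc ++ [(p ++ dashes i ++ String.mk [ch], rest')] else acc)

-- one layer: expand every pending state by the current target character
def layerB (c : Option Char) (states : List (String × List Char)) : List (String × List Char) :=
  states.foldl (fun acc st => scanB c st.1 0 st.2 acc) []

def helper_alt (s : String) (arr : List String) (remain : String) (length : Int) : List String :=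
  if length = 0 then arr ++ [remain ++ dashes s.toList.length]
  else
    let states := (PySem.List.pyRange 0 length 1).foldl
      (fun st t => layerB (PySem.Str.pyGet? word (PySem.Str.len word - length + t)) st)
      [(remain, s.toList)]
    arr ++ states.map (fun st => st.1 ++ dashes st.2.length)

-- ===== PRECONDITION & SPEC =====
-- Pre_ excludes length == 0, where A returns None (no value of the list type), and length
-- outside 1..12, where A raises IndexError on any nonempty s and, for the degenerate empty s,
-- returns arr untouched only because its loop body never runs (an artefact B does not mimic).
def Pre_helper (s : String) (arr : List String) (remain : String) (length : Int) : Prop :=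
  1 ≤ length ∧ length ≤ 12
instance (s : String) (arr : List String) (remain : String) (length : Int) : Decidable (Pre_helper s arr remain length) := by unfold Pre_helper; infer_instance

def pvWitness_helper : String × List String × String × Int := ("banana", [], "", 6)

def Spec_helper (s : String) (arr : List String) (remain : String) (length : Int) (out : List String) : Prop := out = helper_alt s arr remain length
instance (s : String) (arr : List String) (remain : String) (length : Int) (out : List String) : Decidable (Spec_helper s arr remain length out) := by unfold Spec_helper; infer_instance

-- ===== CLAIM (what is proved, stated in full; the proofs are below) =====
def Claim_equal_helper : Prop := ∀ (s : String) (arr : List String) (remain : String) (length : Int), Dom_helper s arr remain length → Pre_helper s arr remain length → Spec_helper s arr remain length (helper s arr remain length)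

-- ===== LEMMAS AND PROOFS =====

-- A-side: the output list parameter is only appended to (mutual with loopA, by strong
-- induction on the length of the remaining string)
theorem loopA_append_aux : ∀ (n : Nat), ∀ (rest : List Char), rest.length ≤ n →
    ∀ (arr : List String) (r : String) (ℓ : Int) (i : Nat),
      loopA arr r ℓ i rest = arr ++ loopA [] r ℓ i rest := by
  intro n
  induction n with
  | zero =>
    intro rest h arr r ℓ i
    have : rest = [] := List.eq_nil_of_length_eq_zero (Nat.le_zero.mp h)
    subst this
    simp [loopA]
  | succ n ih =>
    intro rest h arr r ℓ i
    cases rest with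
    | nil => simp [loopA]
    | cons j rest' =>
      have hlen : rest'.length ≤ n := by simpa using h
      have hA : ∀ (arr : List String) (p : String) (ℓ' : Int),
          helperACore rest' arr p ℓ' = arr ++ helperACore rest' [] p ℓ' := by
        intro arr p ℓ'
        unfold helperACore
        split
        · simp
        · rw [ih rest' hlen arr, ih rest' hlen []]
      show loopA arr r ℓ i (j :: rest') = arr ++ loopA [] r ℓ i (j :: rest')
      rw [loopA, loopA]
      by_cases hc : PySem.Str.pyGet? word (PySem.Str.len word - ℓ) = some j
      · simp only [if_pos hc]
        rw [hA arr, ih rest' hlen (arr ++ helperACore rest' [] (r ++ dashes i ++ String.mk [j]) (ℓ - 1)),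
            ih rest' hlen (helperACore rest' [] (r ++ dashes i ++ String.mk [j]) (ℓ - 1))]
        simp
      · simp only [if_neg hc]
        rw [ih rest' hlen arr]

theorem helperACore_append (s : List Char) (arr : List String) (r : String) (ℓ : Int) :
    helperACore s arr r ℓ = arr ++ helperACore s [] r ℓ := by
  unfold helperACore
  split
  · simp
  · rw [loopA_append_aux s.length s le_rfl arr, loopA_append_aux s.length s le_rfl []]

-- B-side: the scan only appends to its accumulator
theorem scanB_acc (c : Option Char) (p : String) :
    ∀ (rest : List Char) (i : Nat) (acc : List (String × List Char)),
      scanB c p i rest acc = acc ++ scanB c p i rest [] := by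
  intro rest
  induction rest with
  | nil => intro i acc; simp [scanB]
  | cons ch rest' ih =>
    intro i acc
    rw [scanB, scanB]
    by_cases hc : c = some ch
    · simp only [if_pos hc]
      rw [ih (i+1) (acc ++ [(p ++ dashes i ++ String.mk [ch], rest')]),
          ih (i+1) ([] ++ [(p ++ dashes i ++ String.mk [ch], rest')])]
      simp
    · simp only [if_neg hc]
      rw [ih (i+1) acc]

theorem layerB_eq_flatMap (c : Option Char) (states : List (String × List Char)) :
    layerB c states = states.flatMap (fun st => scanB c st.1 0 st.2 []) := by
  unfold layerB
  suffices h : ∀ (sts : List (String × List Char)) (acc : List (String × List Char)),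
      sts.foldl (fun acc st => scanB c st.1 0 st.2 acc) acc
        = acc ++ sts.flatMap (fun st => scanB c st.1 0 st.2 []) by
    simpa using h states []
  intro sts
  induction sts with
  | nil => intro acc; simp
  | cons st sts' ih =>
    intro acc
    simp only [List.foldl_cons, List.flatMap_cons]
    rw [scanB_acc, ih]
    simp

theorem layerB_append (c : Option Char) (s1 s2 : List (String × List Char)) :
    layerB c (s1 ++ s2) = layerB c s1 ++ layerB c s2 := by
  simp [layerB_eq_flatMap]

-- the whole worklist run, as a fold of layers
def runB (f : Int → Option Char) (ts : List Int) (states : List (String × List Char)) : List (String × List Char) :=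
  ts.foldl (fun st t => layerB (f t) st) states

theorem runB_append (f : Int → Option Char) :
    ∀ (ts : List Int) (s1 s2 : List (String × List Char)),
      runB f ts (s1 ++ s2) = runB f ts s1 ++ runB f ts s2 := by
  intro ts
  induction ts with
  | nil => intro s1 s2; simp [runB]
  | cons t ts' ih =>
    intro s1 s2
    simp only [runB, List.foldl_cons]
    rw [layerB_append]
    exact ih (layerB (f t) s1) (layerB (f t) s2)

theorem runB_flatMap (f : Int → Option Char) (ts : List Int)
    (fin : String × List Char → String) (F : String × List Char → List String) :
    ∀ (states : List (String × List Char)),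
      (∀ st ∈ states, (runB f ts [st]).map fin = F st) →
      (runB f ts states).map fin = states.flatMap F := by
  intro states
  induction states with
  | nil =>
    intro _
    have : runB f ts [] = [] := by
      induction ts with
      | nil => simp [runB]
      | cons t ts' ih => simpa [runB, layerB] using ih
    simp [this]
  | cons st sts ih =>
    intro h
    have : (st :: sts) = [st] ++ sts := rfl
    rw [this, runB_append, List.map_append, ih (fun x hx => h x (List.mem_cons_of_mem st hx)),
        h st (List.mem_cons_self)]
    simp

-- A's inner loop equals one B-scan followed by the recursive continuation
theorem loopA_eq_scan (p : String) (ℓ : Int) :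
    ∀ (rest : List Char) (i : Nat),
      loopA [] p ℓ i rest
        = (scanB (PySem.Str.pyGet? word (PySem.Str.len word - ℓ)) p i rest []).flatMap
            (fun st => helperACore st.2 [] st.1 (ℓ - 1)) := by
  intro rest
  induction rest with
  | nil => intro i; simp [loopA, scanB]
  | cons j rest' ih =>
    intro i
    rw [loopA, scanB]
    by_cases hc : PySem.Str.pyGet? word (PySem.Str.len word - ℓ) = some j
    · simp only [if_pos hc]
      rw [loopA_append_aux rest'.length rest' le_rfl, ih (i+1)]
      simp only [List.nil_append]
      rw [scanB_acc (PySem.Str.pyGet? word (PySem.Str.len word - ℓ)) p rest' (i+1)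
            [(p ++ dashes i ++ String.mk [j], rest')]]
      simp
    · simp only [if_neg hc]
      rw [ih (i+1)]

-- main correspondence: running the worklist for ℓ layers and finishing equals A's recursion
theorem main_corr : ∀ (n : Nat) (ℓ : Int), ℓ = (n : Int) →
    ∀ (s : List Char) (p : String),
      ((PySem.List.pyRange 0 ℓ 1).foldl
          (fun st t => layerB (PySem.Str.pyGet? word (PySem.Str.len word - ℓ + t)) st)
          [(p, s)]).map (fun st => st.1 ++ dashes st.2.length)
        = helperACore s [] p ℓ := by
  intro n
  induction n with
  | zero =>
    intro ℓ hℓ s p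
    subst hℓ
    simp [helperACore]
  | succ n ih =>
    intro ℓ hℓ s p
    have hpos : (0 : Int) < ℓ := by omega
    have hne : ℓ ≠ 0 := by omega
    rw [PySem.List.pyRange_one_cons hpos]
    simp only [List.foldl_cons, zero_add]
    -- first layer on the single starting state
    have hlayer : layerB (PySem.Str.pyGet? word (PySem.Str.len word - ℓ + 0)) [(p, s)]
        = scanB (PySem.Str.pyGet? word (PySem.Str.len word - ℓ)) p 0 s [] := by
      simp [layerB]
    rw [hlayer]
    -- re-index the remaining layers: pyRange 1 ℓ 1 with char (W - ℓ + t)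
    -- is pyRange 0 (ℓ-1) 1 with char (W - (ℓ-1) + t)
    have hfold : ∀ (states : List (String × List Char)),
        (PySem.List.pyRange 1 ℓ 1).foldl
            (fun st t => layerB (PySem.Str.pyGet? word (PySem.Str.len word - ℓ + t)) st) states
        = (PySem.List.pyRange 0 (ℓ - 1) 1).foldl
            (fun st t => layerB (PySem.Str.pyGet? word (PySem.Str.len word - (ℓ - 1) + t)) st) states := by
      intro states
      rw [PySem.List.pyRange_one 1 ℓ, PySem.List.pyRange_one 0 (ℓ - 1), List.foldl_map, List.foldl_map]
      have harg : (fun (st : List (String × List Char)) (k : Nat) =>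
            layerB (PySem.Str.pyGet? word (PySem.Str.len word - ℓ + ((1 : Int) + (k : Int)))) st)
          = (fun (st : List (String × List Char)) (k : Nat) =>
            layerB (PySem.Str.pyGet? word (PySem.Str.len word - (ℓ - 1) + ((0 : Int) + (k : Int)))) st) := by
        funext st k
        congr 2
        ring
      rw [harg]
      norm_num
    rw [hfold]
    -- each state of the first layer is finished by the induction hypothesis
    have hIH : ∀ st ∈ scanB (PySem.Str.pyGet? word (PySem.Str.len word - ℓ)) p 0 s [],
        (runB (fun t => PySem.Str.pyGet? word (PySem.Str.len word - (ℓ - 1) + t))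
            (PySem.List.pyRange 0 (ℓ - 1) 1) [st]).map (fun st => st.1 ++ dashes st.2.length)
          = helperACore st.2 [] st.1 (ℓ - 1) := by
      intro st _
      exact ih (ℓ - 1) (by omega) st.2 st.1
    rw [show (PySem.List.pyRange 0 (ℓ - 1) 1).foldl
            (fun st t => layerB (PySem.Str.pyGet? word (PySem.Str.len word - (ℓ - 1) + t)) st)
            (scanB (PySem.Str.pyGet? word (PySem.Str.len word - ℓ)) p 0 s [])
        = runB (fun t => PySem.Str.pyGet? word (PySem.Str.len word - (ℓ - 1) + t))
            (PySem.List.pyRange 0 (ℓ - 1) 1)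
            (scanB (PySem.Str.pyGet? word (PySem.Str.len word - ℓ)) p 0 s []) from rfl]
    rw [runB_flatMap _ _ _ _ _ hIH]
    -- and A's side unfolds to the same flatMap
    rw [helperACore, if_neg hne, loopA_eq_scan]

-- ===== VERDICT (by name: the statement is the Claim_ definition above) =====
theorem helper_spec : Claim_equal_helper := by
  intro s arr remain length _ hpre
  obtain ⟨h1, h2⟩ := hpre
  have hne : length ≠ 0 := by omega
  unfold Spec_helper helper helper_alt
  rw [if_neg hne]
  simp only []
  rw [helperACore_append]
  congr 1
  exact (main_corr length.toNat length (by omega) s.toList remain).symm
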